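-- pv_equiv track=rewrite | github.com/Omega-Makena/KScarcity | kshiked/ui/kshield/simulation.py | _discover_dimensions
-- ===== SOURCE A (Python) =====
-- def _discover_dimensions(trajectory):
--     """
--     Auto-discover ALL available dimension categories and keys from trajectory
--     frames.  Returns {category_name: [sorted list of keys]}.
--     Categories scanned: outcomes, channels, flows, sector_balances,
--     policy_vector, shock_vector.
--     """
--     categories = {}
--     vector_keys = [
--         "outcomes", "channels", "flows", "sector_balances",
--         "policy_vector", "shock_vector",
--     ]
--     for cat in vector_keys:
--         keys = sorted({
--             k for f in trajectory
--             for k in (f.get(cat, {}) if isinstance(f.get(cat), dict) else {})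
--         })
--         if keys:
--             categories[cat] = keys
--     return categories
-- ===== SOURCE B (Python) =====
-- def _discover_dimensions(trajectory):
--     """Sort-then-group: one pass collects a flat set of (category, key)
--     pairs, a single global lexicographic sort orders them, and one grouping
--     scan builds the per-category key lists (already sorted, duplicates gone)."""
--     cats = (
--         "outcomes", "channels", "flows", "sector_balances",
--         "policy_vector", "shock_vector",
--     )
--     pairs = set()
--     for f in trajectory:
--         for c in cats:
--             v = f.get(c)
--             if isinstance(v, dict):
--                 pairs.update((c, k) for k in v)
--     groups = {}
--     for c, k in sorted(pairs):
--         groups.setdefault(c, []).append(k)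
--     return {c: groups[c] for c in cats if c in groups}
-- ===== Notes on version B (the rewrite author's own statement) =====
-- stated objective: alternative
-- what changed: A runs six independent set-comprehension scans of the trajectory and sorts each category's key set separately; B collects one flat set of (category, key) pairs in a single pass, performs ONE global lexicographic sort of that pair set, and then groups the sorted pairs into per-category lists in one scan (sort-then-group), emitting the categories that appear in the groups.
import Mathlib
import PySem

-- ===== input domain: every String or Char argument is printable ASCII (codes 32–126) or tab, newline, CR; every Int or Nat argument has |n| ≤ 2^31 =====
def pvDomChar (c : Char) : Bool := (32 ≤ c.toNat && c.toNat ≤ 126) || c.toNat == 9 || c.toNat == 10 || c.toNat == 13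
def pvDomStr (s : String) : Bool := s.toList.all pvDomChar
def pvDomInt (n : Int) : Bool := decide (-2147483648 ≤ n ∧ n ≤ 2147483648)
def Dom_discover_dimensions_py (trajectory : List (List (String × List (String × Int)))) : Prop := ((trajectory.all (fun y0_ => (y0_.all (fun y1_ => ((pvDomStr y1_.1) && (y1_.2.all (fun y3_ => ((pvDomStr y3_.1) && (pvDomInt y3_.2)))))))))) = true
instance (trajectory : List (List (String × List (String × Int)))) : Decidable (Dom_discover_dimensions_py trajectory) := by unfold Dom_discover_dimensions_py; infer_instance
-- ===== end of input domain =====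

-- B replaces A's six per-category scan+sort passes by sort-then-group: one pass
-- collects a flat set of (category, key) pairs, one global lexicographic sort
-- orders it, one grouping scan builds the per-category lists (objective: alternative).

-- ===== PORT A =====
-- A: for each category, one set-comprehension scan over all frames, sorted; kept iff non-empty.
def discover_dimensions_py (trajectory : List (List (String × List (String × Int)))) : List (String × List String) :=
  let vector_keys : List String :=
    ["outcomes", "channels", "flows", "sector_balances", "policy_vector", "shock_vector"]
  vector_keys.foldl (fun categories cat =>
    let keys := PySem.List.sorted
      (PySem.Set.ofList (trajectory.flatMap (fun f =>
        ((PySem.Dict.get? (PySem.Dict.mk f) cat).getD []).map Prod.fst)))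
      (fun x => x) false
    if keys ≠ [] then categories ++ [(cat, keys)] else categories) []

-- ===== PORT B =====
def pvCats : List String :=
  ["outcomes", "channels", "flows", "sector_balances", "policy_vector", "shock_vector"]

-- B: one pass collecting the (category, key) pair set, one global sort, one grouping scan.
def discover_dimensions_py_alt (trajectory : List (List (String × List (String × Int)))) : List (String × List String) :=
  let pairs : PySem.Set (String × String) :=
    trajectory.foldl (fun s f =>
      pvCats.foldl (fun s c =>
        match PySem.Dict.get? (PySem.Dict.mk f) c with
        | some d => PySem.Set.update s (d.map (fun kv => (c, kv.1)))
        | none => s) s) PySem.Set.empty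
  let sortedPairs := PySem.List.sorted2 pairs (fun p => p.1) (fun p => p.2) false
  let groups : PySem.Dict String (List String) :=
    sortedPairs.foldl (fun g p =>
      match PySem.Dict.get? g p.1 with
      | some l => PySem.Dict.insert g p.1 (l ++ [p.2])
      | none => PySem.Dict.insert g p.1 [p.2]) (PySem.Dict.mk [])
  pvCats.foldl (fun acc c =>
    match PySem.Dict.get? groups c with
    | some l => acc ++ [(c, l)]
    | none => acc) []

-- ===== PRECONDITION & SPEC =====
def Spec_discover_dimensions_py (trajectory : List (List (String × List (String × Int)))) (out : List (String × List String)) : Prop := out = discover_dimensions_py_alt trajectory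
instance (trajectory : List (List (String × List (String × Int)))) (out : List (String × List String)) : Decidable (Spec_discover_dimensions_py trajectory out) := by unfold Spec_discover_dimensions_py; infer_instance

-- ===== CLAIM (what is proved, stated in full; the proofs are below) =====
def Claim_equal_discover_dimensions_py : Prop := ∀ (trajectory : List (List (String × List (String × Int)))), Dom_discover_dimensions_py trajectory → Spec_discover_dimensions_py trajectory (discover_dimensions_py trajectory)

-- ===== LEMMAS AND PROOFS =====

def pvKeysOf (c : String) (f : List (String × List (String × Int))) : List String :=
  ((PySem.Dict.get? (PySem.Dict.mk f) c).getD []).map Prod.fst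

def pvPairsList (trajectory : List (List (String × List (String × Int)))) : List (String × String) :=
  trajectory.flatMap (fun f => pvCats.flatMap (fun c => (pvKeysOf c f).map (fun k => (c, k))))

def pvKA (c : String) (trajectory : List (List (String × List (String × Int)))) : List String :=
  PySem.List.sorted (PySem.Set.ofList (trajectory.flatMap (pvKeysOf c))) (fun x => x) false

theorem pvInner_eq (f : List (String × List (String × Int))) (cats : List String)
    (s : PySem.Set (String × String)) :
    cats.foldl (fun s c =>
        match PySem.Dict.get? (PySem.Dict.mk f) c with
        | some d => PySem.Set.update s (d.map (fun kv => (c, kv.1)))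
        | none => s) s
      = PySem.Set.update s (cats.flatMap (fun c => (pvKeysOf c f).map (fun k => (c, k)))) := by
  induction cats generalizing s with
  | nil => simp [PySem.Set.update]
  | cons c cats ih =>
      simp only [List.foldl_cons, List.flatMap_cons, ih]
      rcases h : PySem.Dict.get? (PySem.Dict.mk f) c with _ | d
      · simp [pvKeysOf, h, PySem.Set.update]
      · simp [pvKeysOf, h, PySem.Set.update, List.map_map, Function.comp_def]

theorem pvFoldUpdate {α β : Type} [BEq α] (l : List β) (g : β → List α) (s : PySem.Set α) :
    l.foldl (fun s f => PySem.Set.update s (g f)) s = PySem.Set.update s (l.flatMap g) := by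
  induction l generalizing s with
  | nil => simp [PySem.Set.update]
  | cons f l ih =>
      rw [List.foldl_cons, ih]
      simp [PySem.Set.update, List.foldl_append]

theorem pvPairs_eq (trajectory : List (List (String × List (String × Int)))) :
    trajectory.foldl (fun s f =>
      pvCats.foldl (fun s c =>
        match PySem.Dict.get? (PySem.Dict.mk f) c with
        | some d => PySem.Set.update s (d.map (fun kv => (c, kv.1)))
        | none => s) s) PySem.Set.empty
    = PySem.Set.ofList (pvPairsList trajectory) := by
  have h : ∀ s, trajectory.foldl (fun s f =>
      pvCats.foldl (fun s c =>
        match PySem.Dict.get? (PySem.Dict.mk f) c with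
        | some d => PySem.Set.update s (d.map (fun kv => (c, kv.1)))
        | none => s) s) s = PySem.Set.update s (pvPairsList trajectory) := by
    intro s
    unfold pvPairsList
    rw [← pvFoldUpdate trajectory (fun f => pvCats.flatMap (fun c => (pvKeysOf c f).map (fun k => (c, k)))) s]
    exact PySem.List.foldl_congr_mem (l := trajectory) (init := s) (h := fun s f _ => pvInner_eq f pvCats s)
  rw [h PySem.Set.empty]; rfl

theorem pvGroup_get (ps : List (String × String)) (g : PySem.Dict String (List String)) (c : String) :
    PySem.Dict.get? (ps.foldl (fun g p =>
      match PySem.Dict.get? g p.1 with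
      | some l => PySem.Dict.insert g p.1 (l ++ [p.2])
      | none => PySem.Dict.insert g p.1 [p.2]) g) c
    = match PySem.Dict.get? g c with
      | some l => some (l ++ (ps.filter (fun p => p.1 == c)).map Prod.snd)
      | none => if (ps.filter (fun p => p.1 == c)).map Prod.snd = [] then none
                else some ((ps.filter (fun p => p.1 == c)).map Prod.snd) := by
  induction ps generalizing g with
  | nil =>
      rcases h : PySem.Dict.get? g c with _ | l <;> simp [h]
  | cons p ps ih =>
      rw [List.foldl_cons, ih]
      by_cases hpc : p.1 = c
      · subst hpc
        rcases h : PySem.Dict.get? g p.1 with _ | l <;>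
          simp [PySem.Dict.get?_insert_self]
      · have hne : (p.1 == c) = false := by simp [hpc]
        have hf : List.filter (fun p => p.1 == c) (p :: ps) = List.filter (fun p => p.1 == c) ps := by
          simp [hne]
        rw [hf]
        rcases h : PySem.Dict.get? g p.1 with _ | l <;>
          rcases h2 : PySem.Dict.get? g c with _ | l2 <;>
            simp [h2, PySem.Dict.get?_insert, Ne.symm hpc]

theorem pvSorted2_eq (ps : List (String × String)) :
    PySem.List.sorted2 ps (fun p => p.1) (fun p => p.2) false
      = PySem.List.sorted ps (fun p => toLex (p.1, p.2)) false := by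
  have hb : (fun a b : String × String =>
        decide (a.1 < b.1) || (!decide (b.1 < a.1) && decide (a.2 < b.2)))
      = (fun a b : String × String => decide (toLex (a.1, a.2) < toLex (b.1, b.2))) := by
    funext a b
    rcases lt_trichotomy a.1 b.1 with h | h | h
    · simp [Prod.Lex.lt_iff, h]
    · simp [Prod.Lex.lt_iff, h]
    · simp [Prod.Lex.lt_iff, h, lt_asymm h, ne_of_gt h]
  rw [PySem.List.sorted_eq_foldl_insertBy]
  show ps.foldl (fun acc x => PySem.List.insertBy (fun a b : String × String =>
      decide (a.1 < b.1) || (!decide (b.1 < a.1) && decide (a.2 < b.2))) x acc) [] = _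
  rw [hb]

theorem pvMem_pairsList (trajectory : List (List (String × List (String × Int)))) (c k : String)
    (hc : c ∈ pvCats) :
    ((c, k) ∈ pvPairsList trajectory ↔ k ∈ trajectory.flatMap (pvKeysOf c)) := by
  simp only [pvPairsList, List.mem_flatMap, List.mem_map, Prod.mk.injEq]
  constructor
  · rintro ⟨f, hf, c', _, k', hk', rfl, rfl⟩
    exact ⟨f, hf, hk'⟩
  · rintro ⟨f, hf, hk⟩
    exact ⟨f, hf, c, hc, k, hk, rfl, rfl⟩

theorem pvF_eq (trajectory : List (List (String × List (String × Int)))) (c : String)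
    (hc : c ∈ pvCats) :
    ((PySem.List.sorted (PySem.Set.ofList (pvPairsList trajectory))
        (fun p => toLex (p.1, p.2)) false).filter (fun p => p.1 == c)).map Prod.snd
      = pvKA c trajectory := by
  unfold pvKA
  set S := PySem.List.sorted (PySem.Set.ofList (pvPairsList trajectory))
      (fun p => toLex (p.1, p.2)) false with hS
  have hperm : S.Perm (PySem.Set.ofList (pvPairsList trajectory)) :=
    PySem.List.sorted_perm _ _ _
  have hnodupS : S.Nodup := hperm.nodup_iff.mpr (PySem.Set.nodup_ofList _)
  have hnodupF : (S.filter (fun p => p.1 == c)).Nodup := hnodupS.filter _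
  -- every member of the filtered list has first component c
  have hfirst : ∀ p ∈ S.filter (fun p => p.1 == c), p.1 = c := by
    intro p hp
    have := (List.mem_filter.mp hp).2
    simpa using this
  have hnodup : ((S.filter (fun p => p.1 == c)).map Prod.snd).Nodup := by
    refine List.Nodup.map_on ?_ hnodupF
    intro x hx y hy hxy
    exact Prod.ext (by rw [hfirst x hx, hfirst y hy]) hxy
  have hpair : List.Pairwise (fun a b : String => a ≤ b)
      ((S.filter (fun p => p.1 == c)).map Prod.snd) := by
    rw [List.pairwise_map]
    have hpw : List.Pairwise (fun a b : String × String => toLex (a.1, a.2) ≤ toLex (b.1, b.2)) S :=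
      PySem.List.sorted_pairwise _ _
    have hpwf : List.Pairwise (fun a b : String × String => toLex (a.1, a.2) ≤ toLex (b.1, b.2)) (S.filter (fun p => p.1 == c)) := hpw.sublist List.filter_sublist
    refine hpwf.imp_of_mem ?_
    intro a b ha hb hab
    have ha1 := hfirst a ha
    have hb1 := hfirst b hb
    rcases Prod.Lex.le_iff.mp hab with h | ⟨_, h⟩
    · rw [ha1, hb1] at h; exact absurd h (lt_irrefl c)
    · exact h
  have hmem : ∀ k : String, k ∈ (S.filter (fun p => p.1 == c)).map Prod.snd ↔
      k ∈ PySem.Set.ofList (trajectory.flatMap (pvKeysOf c)) := by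
    intro k
    rw [PySem.Set.mem_ofList, ← pvMem_pairsList trajectory c k hc]
    constructor
    · rintro hk
      rcases List.mem_map.mp hk with ⟨p, hp, rfl⟩
      have h1 := hfirst p hp
      have h2 := (List.mem_filter.mp hp).1
      have : p ∈ PySem.Set.ofList (pvPairsList trajectory) := hperm.mem_iff.mp h2
      rw [PySem.Set.mem_ofList] at this
      rwa [← h1]
    · intro hk
      have : (c, k) ∈ S := by
        rw [hperm.mem_iff, PySem.Set.mem_ofList]
        exact hk
      exact List.mem_map.mpr ⟨(c, k), List.mem_filter.mpr ⟨this, by simp⟩, rfl⟩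
  have hpermF : ((S.filter (fun p => p.1 == c)).map Prod.snd).Perm
      (PySem.Set.ofList (trajectory.flatMap (pvKeysOf c))) := by
    rw [List.perm_ext_iff_of_nodup hnodup (PySem.Set.nodup_ofList _)]
    exact hmem
  exact (PySem.List.sorted_id_eq_of_perm_of_pairwise _ _ hpermF hpair).symm

-- ===== VERDICT (by name: the statement is the Claim_ definition above) =====
theorem discover_dimensions_py_spec : Claim_equal_discover_dimensions_py := by
  intro trajectory _
  unfold Spec_discover_dimensions_py discover_dimensions_py discover_dimensions_py_alt
  simp only [pvPairs_eq, pvSorted2_eq, pvGroup_get]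
  apply PySem.List.foldl_congr_mem
  intro acc c hc
  have hF := pvF_eq trajectory c hc
  have hKA : pvKA c trajectory = PySem.List.sorted
      (PySem.Set.ofList (trajectory.flatMap (fun f =>
        ((PySem.Dict.get? (PySem.Dict.mk f) c).getD []).map Prod.fst)))
      (fun x => x) false := rfl
  rw [hKA] at hF
  rw [hF]
  have hnil : PySem.Dict.get? (PySem.Dict.mk ([] : List (String × List String))) c = none := rfl
  simp only [hnil]
  by_cases h : PySem.List.sorted
      (PySem.Set.ofList (trajectory.flatMap (fun f =>
        ((PySem.Dict.get? (PySem.Dict.mk f) c).getD []).map Prod.fst)))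
      (fun x => x) false = []
  · simp [h]
  · simp [h]
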